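-- pv_equiv track=rewrite | github.com/yangDM9378/Algorithm_Solving | 프로그래머스/lv2/17679. ［1차］ 프렌즈4블록/［1차］ 프렌즈4블록.py | solution
-- ===== SOURCE A (Python) =====
-- def ischeck(m,n,board):
--     check_board = [(0,1),(1,0),(1,1)]
--     used=[[0]*n for _ in range(m)]
--     checked_cnt = 0
--     for i in range(m-1):
--         for j in range(n-1):
--             if board[i][j]!='x':
--                 check_cnt = 0
--                 for check in check_board:
--                     if board[i][j] == board[i+check[0]][j+check[1]]:
--                         check_cnt+=1
--                 if check_cnt == 3:
--                     used[i][j]=1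
--                     for check in check_board:
--                         used[i+check[0]][j+check[1]]=1
--     for i in range(m):
--         for j in range(n):
--             if used[i][j]==1:
--                 board[i][j]='x'
--                 checked_cnt+=1
--     if checked_cnt == 0:
--         return 0
--
--     for j in range(n):
--         for i in range(m-1, -1, -1):
--             if board[i][j] == 'x':
--                 k = i
--                 while k-1 >= 0 and board[k-1][j] == 'x':
--                     k -= 1
--                 if k-1>=0:
--                     board[i][j] = board[k-1][j]
--                     board[k-1][j] = 'x'
--
--     return checked_cnt
--
-- def solution(m, n, board):
--     answer = 0
--     board = list(map(list, board))
--     while True: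
--         check_cnt = ischeck(m,n,board)
--         if check_cnt == 0:
--             break
--         answer+=check_cnt
--
--     return answer
-- ===== SOURCE B (Python) =====
-- def solution(m, n, board):
--     # Round-based rewrite: per round, test each cell directly for membership in a
--     # matching 2x2 block, rebuild the grid by comprehension, and apply gravity by
--     # recomposing each column as 'x'-padding followed by its surviving entries.
--     def covered(g, i, j):
--         for bi in (i - 1, i):
--             for bj in (j - 1, j):
--                 if 0 <= bi < m - 1 and 0 <= bj < n - 1:
--                     c = g[bi][bj]
--                     if c != 'x' and c == g[bi + 1][bj] and c == g[bi][bj + 1] and c == g[bi + 1][bj + 1]: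
--                         return True
--         return False
--
--     grid = [list(row) for row in board]
--     total = 0
--     while True:
--         removed = sum(1 for i in range(m) for j in range(n) if covered(grid, i, j))
--         if removed == 0:
--             return total
--         total += removed
--         marked = [['x' if covered(grid, i, j) else grid[i][j] for j in range(n)] for i in range(m)]
--         cols = []
--         for j in range(n):
--             keep = [marked[i][j] for i in range(m) if marked[i][j] != 'x']
--             cols.append(['x'] * (m - len(keep)) + keep)
--         grid = [[cols[j][i] for j in range(n)] for i in range(m)]
-- ===== Notes on version B (the rewrite author's own statement) =====
-- stated objective: alternative
-- what changed: Per round, B tests each cell directly for membership in a matching 2x2 block (instead of A's used-matrix marked anchor-by-anchor) and applies gravity by recomposing every column as 'x'-padding followed by its surviving entries (instead of A's in-place bubbling of each 'x' cell); Pre_ restricts non-degenerate sizes to the problem's natural domain of an exactly m-by-n board, while A also happens to return (ignoring the excess) on oversized boards.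
-- outside the precondition, e.g. on solution(2, 2, ['aab', 'aab']): A returns 4, B returns 4; on solution(2, 2, ['aab', 'aab', 'zzz']): A returns 4, B returns 4
import Mathlib
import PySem

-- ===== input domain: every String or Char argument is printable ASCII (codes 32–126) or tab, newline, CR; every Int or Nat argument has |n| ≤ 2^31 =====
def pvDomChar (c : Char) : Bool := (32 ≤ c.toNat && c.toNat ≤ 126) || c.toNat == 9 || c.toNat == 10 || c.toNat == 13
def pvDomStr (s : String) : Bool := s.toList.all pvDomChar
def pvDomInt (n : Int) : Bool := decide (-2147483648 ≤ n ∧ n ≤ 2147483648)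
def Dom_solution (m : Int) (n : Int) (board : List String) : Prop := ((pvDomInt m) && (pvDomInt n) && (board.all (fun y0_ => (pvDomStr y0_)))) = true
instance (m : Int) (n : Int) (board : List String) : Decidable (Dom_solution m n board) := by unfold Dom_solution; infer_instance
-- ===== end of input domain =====

-- B rewrites each round: a direct per-cell 2x2-membership test replaces A's used-matrix
-- marking, and gravity recomposes each column as 'x'-padding ++ surviving entries instead
-- of A's in-place bubbling (objective: alternative round structure, same cost).
-- Neither version mutates the caller's board (both copy it first).

-- ===== PORT A =====
-- shared 2D indexing helpers (board[i][j] / board[i][j] = v; defaults unreachable under Pre_)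
def gget (g : List (List Char)) (i j : Int) : Char :=
  PySem.List.pyGetD (PySem.List.pyGetD g i []) j 'x'

def gset (g : List (List Char)) (i j : Int) (c : Char) : List (List Char) :=
  PySem.List.pySetD g i (PySem.List.pySetD (PySem.List.pyGetD g i []) j c)

def uget (u : List (List Int)) (i j : Int) : Int :=
  PySem.List.pyGetD (PySem.List.pyGetD u i []) j 0

def uset (u : List (List Int)) (i j : Int) (v : Int) : List (List Int) :=
  PySem.List.pySetD u i (PySem.List.pySetD (PySem.List.pyGetD u i []) j v)

-- "k = i; while k-1 >= 0 and board[k-1][j] == 'x': k -= 1" — k stays ≥ 0, so Nat recursion is exact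
def findTopA (g : List (List Char)) (j : Int) : Nat → Nat
  | 0 => 0
  | k + 1 => if gget g (k : Int) j == 'x' then findTopA g j k else k + 1

def ischeckA (m n : Int) (board0 : List (List Char)) : Int × List (List Char) :=
  let checkBoard : List (Int × Int) := [(0, 1), (1, 0), (1, 1)]
  let used : List (List Int) := (PySem.List.pyRange 0 m 1).map (fun _ => PySem.List.pyRepeat [0] n)
  let used := (PySem.List.pyRange 0 (m - 1) 1).foldl (fun used i =>
    (PySem.List.pyRange 0 (n - 1) 1).foldl (fun used j =>
      if gget board0 i j ≠ 'x' then
        let checkCnt : Int := checkBoard.foldl (fun c ch =>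
          if gget board0 i j == gget board0 (i + ch.1) (j + ch.2) then c + 1 else c) 0
        if checkCnt == 3 then
          checkBoard.foldl (fun used ch => uset used (i + ch.1) (j + ch.2) 1) (uset used i j 1)
        else used
      else used) used) used
  let st := (PySem.List.pyRange 0 m 1).foldl (fun st i =>
    (PySem.List.pyRange 0 n 1).foldl (fun st j =>
      if uget used i j == 1 then (gset st.1 i j 'x', st.2 + 1) else st) st) (board0, (0 : Int))
  if st.2 == 0 then (0, st.1) else
  let board2 := (PySem.List.pyRange 0 n 1).foldl (fun b j =>
    (PySem.List.pyRange (m - 1) (-1) (-1)).foldl (fun b i =>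
      if gget b i j == 'x' then
        let k : Int := (findTopA b j i.toNat : Int)
        if k - 1 ≥ 0 then gset (gset b i j (gget b (k - 1) j)) (k - 1) j 'x' else b
      else b) b) st.1
  (st.2, board2)

-- "while True" — fuel m*n+1 bounds the rounds: every non-final round turns ≥ 1 cell to 'x'
def loopA (m n : Int) : Nat → List (List Char) → Int → Int
  | 0, _, answer => answer
  | fuel + 1, board, answer =>
    let r := ischeckA m n board
    if r.1 == 0 then answer else loopA m n fuel r.2 (answer + r.1)

def solution (m : Int) (n : Int) (board : List String) : Int :=
  loopA m n (m.toNat * n.toNat + 1) (board.map (fun s => s.toList)) 0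

-- ===== PORT B =====
def coveredB (m n : Int) (g : List (List Char)) (i j : Int) : Bool :=
  ([i - 1, i] : List Int).any (fun bi => ([j - 1, j] : List Int).any (fun bj =>
    (decide (0 ≤ bi) && decide (bi < m - 1) && decide (0 ≤ bj) && decide (bj < n - 1)) &&
    (let c := gget g bi bj
     (c != 'x') && (c == gget g (bi + 1) bj) && (c == gget g bi (bj + 1)) && (c == gget g (bi + 1) (bj + 1)))))

def loopB (m n : Int) : Nat → List (List Char) → Int → Int
  | 0, _, total => total
  | fuel + 1, grid, total =>
    let removed : Int := (PySem.List.pyRange 0 m 1).foldl (fun acc i =>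
      (PySem.List.pyRange 0 n 1).foldl (fun acc j =>
        if coveredB m n grid i j then acc + 1 else acc) acc) 0
    if removed == 0 then total
    else
      let marked := (PySem.List.pyRange 0 m 1).map (fun i =>
        (PySem.List.pyRange 0 n 1).map (fun j =>
          if coveredB m n grid i j then 'x' else gget grid i j))
      let cols := (PySem.List.pyRange 0 n 1).map (fun j =>
        let keep := ((PySem.List.pyRange 0 m 1).filter (fun i => gget marked i j != 'x')).map
          (fun i => gget marked i j)
        PySem.List.pyRepeat ['x'] (m - (keep.length : Int)) ++ keep)
      let grid' := (PySem.List.pyRange 0 m 1).map (fun i =>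
        (PySem.List.pyRange 0 n 1).map (fun j => gget cols j i))
      loopB m n fuel grid' (total + removed)

def solution_alt (m : Int) (n : Int) (board : List String) : Int :=
  loopB m n (m.toNat * n.toNat + 1) (board.map (fun s => s.toList)) 0

-- ===== PRECONDITION & SPEC =====
-- Pre_ = the inputs the programs are claimed on: either a degenerate size (m ≤ 1 or n ≤ 1,
-- where no 2x2 block exists and no board cell is ever read), or the problem's natural domain
-- of a board of exactly m rows of exactly n characters. A also happens to return (ignoring
-- the excess) when the board is larger than m×n; that malformed shape is excluded as outside
-- the stated problem, not because the programs disagree there.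
def Pre_solution (m : Int) (n : Int) (board : List String) : Prop :=
  (m ≤ 1 ∨ n ≤ 1) ∨ ((board.length : Int) = m ∧ ∀ s ∈ board, (s.toList.length : Int) = n)
instance (m : Int) (n : Int) (board : List String) : Decidable (Pre_solution m n board) := by
  unfold Pre_solution; infer_instance

def pvWitness_solution : Int × Int × List String := (2, 2, ["ab", "ab"])

def Spec_solution (m : Int) (n : Int) (board : List String) (out : Int) : Prop := out = solution_alt m n board
instance (m : Int) (n : Int) (board : List String) (out : Int) : Decidable (Spec_solution m n board out) := by unfold Spec_solution; infer_instance

-- ===== CLAIM (what is proved, stated in full; the proofs are below) =====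
def Claim_equal_solution : Prop := ∀ (m : Int) (n : Int) (board : List String), Dom_solution m n board → Pre_solution m n board → Spec_solution m n board (solution m n board)

-- ===== LEMMAS AND PROOFS =====

-- ---- generic 2D-grid model (Nat indices) ----
def get2 {α : Type} (d : α) (g : List (List α)) (i j : Nat) : α := (g.getD i []).getD j d
def set2 {α : Type} (g : List (List α)) (i j : Nat) (v : α) : List (List α) :=
  g.set i ((g.getD i []).set j v)
def ShapeN {α : Type} (M N : Nat) (g : List (List α)) : Prop :=
  g.length = M ∧ ∀ r ∈ g, r.length = N

theorem getD_set {α : Type} (l : List α) (a : Nat) (x d : α) (i : Nat) :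
    (l.set a x).getD i d = if a = i ∧ a < l.length then x else l.getD i d := by
  simp [List.getD_eq_getElem?_getD, List.getElem?_set]; split <;> split <;> simp_all

theorem row_len {α : Type} {M N : Nat} {g : List (List α)} (h : ShapeN M N g) {a : Nat}
    (ha : a < M) : (g.getD a []).length = N := by
  obtain ⟨h1, h2⟩ := h
  have : a < g.length := by omega
  rw [List.getD_eq_getElem?_getD, List.getElem?_eq_getElem this]
  exact h2 _ (List.getElem_mem _)

theorem shape_set2 {α : Type} {M N : Nat} {g : List (List α)} (h : ShapeN M N g) (a b : Nat)
    (v : α) (ha : a < M) : ShapeN M N (set2 g a b v) := by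
  refine ⟨by simp [set2, h.1], ?_⟩
  intro r hr
  rcases List.mem_or_eq_of_mem_set hr with h' | h'
  · exact h.2 _ h'
  · subst h'; rw [List.length_set]; exact row_len h ha

theorem get2_set2 {α : Type} {M N : Nat} {g : List (List α)} (h : ShapeN M N g) (d : α)
    {a b : Nat} (i j : Nat) (v : α) (ha : a < M) (hb : b < N) :
    get2 d (set2 g a b v) i j = if a = i ∧ b = j then v else get2 d g i j := by
  have hg : a < g.length := by have := h.1; omega
  have hrow : (g.getD a []).length = N := row_len h ha
  unfold get2 set2
  rw [getD_set]
  by_cases hai : a = i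
  · subst hai
    rw [if_pos ⟨rfl, hg⟩, getD_set]
    by_cases hbj : b = j
    · subst hbj
      rw [if_pos ⟨rfl, by omega⟩, if_pos ⟨rfl, rfl⟩]
    · rw [if_neg (by tauto), if_neg (by tauto)]
  · rw [if_neg (by tauto), if_neg (by tauto)]

-- ---- casts between the ports' Int-indexed accessors and the Nat model ----
theorem gget_cast (g : List (List Char)) (i j : Nat) :
    gget g (i : Int) (j : Int) = get2 'x' g i j := by
  simp [gget, get2, PySem.List.pyGetD_natCast]

theorem uget_cast (u : List (List Int)) (i j : Nat) :
    uget u (i : Int) (j : Int) = get2 0 u i j := by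
  simp [uget, get2, PySem.List.pyGetD_natCast]

theorem gset_cast (g : List (List Char)) (i j : Nat) (cs : Char) :
    gset g (i : Int) (j : Int) cs = set2 g i j cs := by
  simp [gset, set2, PySem.List.pyGetD_natCast, PySem.List.pySetD_natCast]

theorem uset_cast (u : List (List Int)) (i j : Nat) (v : Int) :
    uset u (i : Int) (j : Int) v = set2 u i j v := by
  simp [uset, set2, PySem.List.pyGetD_natCast, PySem.List.pySetD_natCast]

theorem uset_addone_left (u : List (List Int)) (a b : Nat) (v : Int) :
    uset u ((a:Int)+1) (b:Int) v = set2 u (a+1) b v := by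
  rw [show ((a:Int)+1) = (((a+1 : Nat)) : Int) by push_cast; ring, uset_cast]

theorem uset_addone_right (u : List (List Int)) (a b : Nat) (v : Int) :
    uset u (a:Int) ((b:Int)+1) v = set2 u a (b+1) v := by
  rw [show ((b:Int)+1) = (((b+1 : Nat)) : Int) by push_cast; ring, uset_cast]

theorem uset_addone_both (u : List (List Int)) (a b : Nat) (v : Int) :
    uset u ((a:Int)+1) ((b:Int)+1) v = set2 u (a+1) (b+1) v := by
  rw [show ((a:Int)+1) = (((a+1 : Nat)) : Int) by push_cast; ring,
      show ((b:Int)+1) = (((b+1 : Nat)) : Int) by push_cast; ring, uset_cast]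

-- ---- pyRange → List.range reductions ----
theorem foldl_pyRange0 {α : Type} (t : Int) (f : α → Int → α) (init : α) :
    (PySem.List.pyRange 0 t 1).foldl f init
      = (List.range t.toNat).foldl (fun a (k : Nat) => f a (k : Int)) init := by
  rw [PySem.List.pyRange_one, List.foldl_map]
  simp only [Int.sub_zero, zero_add]

theorem map_pyRange0 {α : Type} (t : Int) (f : Int → α) :
    (PySem.List.pyRange 0 t 1).map f = (List.range t.toNat).map (fun (k : Nat) => f (k : Int)) := by
  rw [PySem.List.pyRange_one, List.map_map]
  simp only [Int.sub_zero, Function.comp_def, zero_add]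

theorem filter_pyRange0 (t : Int) (p : Int → Bool) :
    (PySem.List.pyRange 0 t 1).filter p
      = ((List.range t.toNat).filter (fun (k : Nat) => p (k : Int))).map (fun (k : Nat) => (k : Int)) := by
  rw [PySem.List.pyRange_one, List.filter_map]
  simp only [Int.sub_zero, Function.comp_def, zero_add]

theorem foldl_pyRange_countdown {α : Type} (M : Nat) (f : α → Int → α) (init : α) :
    (PySem.List.pyRange ((M : Int) - 1) (-1) (-1)).foldl f init
      = ((List.range M).reverse).foldl (fun a (k : Nat) => f a (k : Int)) init := by
  rw [PySem.List.pyRange_neg_one_eq_reverse]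
  have : ((M : Int) - 1) + 1 = (M : Int) := by omega
  rw [this]
  show (PySem.List.pyRange 0 (M : Int) 1).reverse.foldl f init = _
  rw [PySem.List.pyRange_one, ← List.map_reverse, List.foldl_map]
  simp only [Int.sub_zero, zero_add, Int.toNat_natCast]

-- ---- anchors and coverage ----
def anchorOK (g : List (List Char)) (i j : Nat) : Bool :=
  (get2 'x' g i j != 'x') && (get2 'x' g i j == get2 'x' g i (j+1))
    && (get2 'x' g i j == get2 'x' g (i+1) j) && (get2 'x' g i j == get2 'x' g (i+1) (j+1))

def CovP (g : List (List Char)) (M N i j : Nat) : Prop :=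
  ∃ a b : Nat, a + 1 < M ∧ b + 1 < N ∧ (a = i ∨ a + 1 = i) ∧ (b = j ∨ b + 1 = j) ∧
    anchorOK g a b = true

def mark4 (u : List (List Int)) (i j : Nat) : List (List Int) :=
  set2 (set2 (set2 (set2 u i j 1) i (j+1) 1) (i+1) j 1) (i+1) (j+1) 1

def anchorPairs (M N : Nat) : List (Nat × Nat) :=
  (List.range (M-1)).flatMap (fun a => (List.range (N-1)).map (fun b => (a, b)))

def buildUsed (g : List (List Char)) (M N : Nat) : List (List Int) :=
  (anchorPairs M N).foldl (fun u p => if anchorOK g p.1 p.2 then mark4 u p.1 p.2 else u)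
    (List.replicate M (List.replicate N 0))

theorem shape_mark4 {M N : Nat} {u : List (List Int)} (h : ShapeN M N u) {a b : Nat}
    (ha : a + 1 < M) : ShapeN M N (mark4 u a b) := by
  unfold mark4
  apply shape_set2 _ _ _ _ (by omega)
  apply shape_set2 _ _ _ _ (by omega)
  apply shape_set2 _ _ _ _ (by omega)
  apply shape_set2 h _ _ _ (by omega)

theorem get2_mark4 {M N : Nat} {u : List (List Int)} (h : ShapeN M N u) {a b : Nat}
    (i j : Nat) (ha : a + 1 < M) (hb : b + 1 < N) :
    get2 0 (mark4 u a b) i j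
      = if (a = i ∨ a + 1 = i) ∧ (b = j ∨ b + 1 = j) then 1 else get2 0 u i j := by
  have s1 : ShapeN M N (set2 u a b 1) := shape_set2 h _ _ _ (by omega)
  have s2 : ShapeN M N (set2 (set2 u a b 1) a (b+1) 1) := shape_set2 s1 _ _ _ (by omega)
  have s3 : ShapeN M N (set2 (set2 (set2 u a b 1) a (b+1) 1) (a+1) b 1) :=
    shape_set2 s2 _ _ _ (by omega)
  unfold mark4
  rw [get2_set2 s3 0 i j 1 (by omega) (by omega),
      get2_set2 s2 0 i j 1 (by omega) (by omega),
      get2_set2 s1 0 i j 1 (by omega) (by omega),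
      get2_set2 h 0 i j 1 (by omega) (by omega)]
  split_ifs <;> omega

theorem usedAux (g : List (List Char)) (M N : Nat) :
    ∀ (L : List (Nat × Nat)) (u : List (List Int)), ShapeN M N u →
      (∀ p ∈ L, p.1 + 1 < M ∧ p.2 + 1 < N) →
      ShapeN M N (L.foldl (fun u p => if anchorOK g p.1 p.2 then mark4 u p.1 p.2 else u) u) ∧
      ∀ i j : Nat,
        (get2 0 (L.foldl (fun u p => if anchorOK g p.1 p.2 then mark4 u p.1 p.2 else u) u) i j = 1
          ↔ (get2 0 u i j = 1 ∨ ∃ p ∈ L, anchorOK g p.1 p.2 = true ∧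
              (p.1 = i ∨ p.1 + 1 = i) ∧ (p.2 = j ∨ p.2 + 1 = j))) := by
  intro L
  induction L with
  | nil => intro u hu _; exact ⟨hu, fun i j => by simp⟩
  | cons p L ih =>
    intro u hu hL
    have hp := hL p (by simp)
    have hu' : ShapeN M N (if anchorOK g p.1 p.2 then mark4 u p.1 p.2 else u) := by
      split
      · exact shape_mark4 hu hp.1
      · exact hu
    obtain ⟨hsh, hch⟩ := ih _ hu' (fun q hq => hL q (by simp [hq]))
    refine ⟨by simpa using hsh, fun i j => ?_⟩
    rw [List.foldl_cons]
    rw [hch i j]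
    by_cases ha : anchorOK g p.1 p.2 = true
    · rw [if_pos ha, get2_mark4 hu i j hp.1 hp.2]
      constructor
      · rintro (h | h)
        · split_ifs at h with hc
          · exact Or.inr ⟨p, by simp, ha, hc⟩
          · exact Or.inl h
        · obtain ⟨q, hq, h⟩ := h; exact Or.inr ⟨q, by simp [hq], h⟩
      · rintro (h | ⟨q, hq, hq2⟩)
        · left; split_ifs with hc
          · rfl
          · exact h
        · rcases List.mem_cons.mp hq with rfl | hq'
          · left; rw [if_pos hq2.2]
          · exact Or.inr ⟨q, hq', hq2⟩
    · rw [if_neg ha]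
      constructor
      · rintro (h | ⟨q, hq, h⟩)
        · exact Or.inl h
        · exact Or.inr ⟨q, by simp [hq], h⟩
      · rintro (h | ⟨q, hq, h⟩)
        · exact Or.inl h
        · rcases List.mem_cons.mp hq with rfl | hq'
          · exact absurd h.1 ha
          · exact Or.inr ⟨q, hq', h⟩

theorem get2_replicate_zero (M N i j : Nat) :
    get2 (0 : Int) (List.replicate M (List.replicate N 0)) i j = 0 := by
  unfold get2
  by_cases hi : i < M <;> by_cases hj : j < N <;>
    simp [List.getD_eq_getElem?_getD, List.getElem?_replicate, hi, hj]

theorem shape_replicate_zero (M N : Nat) :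
    ShapeN M N (List.replicate M (List.replicate N (0 : Int))) := by
  refine ⟨by simp, fun r hr => ?_⟩
  rw [List.eq_of_mem_replicate hr]; simp

theorem buildUsed_char (g : List (List Char)) (M N i j : Nat) :
    get2 0 (buildUsed g M N) i j = 1 ↔ CovP g M N i j := by
  have h := (usedAux g M N (anchorPairs M N) _ (shape_replicate_zero M N) ?_).2 i j
  · rw [buildUsed, h, get2_replicate_zero]
    simp only [anchorPairs, List.mem_flatMap, List.mem_map, List.mem_range]
    constructor
    · rintro (h1 | ⟨p, ⟨a, ha, b, hb, rfl⟩, h3, h4, h5⟩)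
      · omega
      · exact ⟨a, b, by omega, by omega, h4, h5, h3⟩
    · rintro ⟨a, b, ha, hb, h4, h5, h3⟩
      exact Or.inr ⟨(a, b), ⟨a, by omega, b, by omega, rfl⟩, h3, h4, h5⟩
  · intro p hp
    simp only [anchorPairs, List.mem_flatMap, List.mem_map, List.mem_range] at hp
    obtain ⟨a, ha, b, hb, rfl⟩ := hp
    omega

theorem gget_addone_left (g : List (List Char)) (a b : Nat) :
    gget g ((a:Int)+1) (b:Int) = get2 'x' g (a+1) b := by
  rw [show ((a:Int)+1) = (((a+1 : Nat)) : Int) by push_cast; ring, gget_cast]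

theorem gget_addone_right (g : List (List Char)) (a b : Nat) :
    gget g (a:Int) ((b:Int)+1) = get2 'x' g a (b+1) := by
  rw [show ((b:Int)+1) = (((b+1 : Nat)) : Int) by push_cast; ring, gget_cast]

theorem gget_addone_both (g : List (List Char)) (a b : Nat) :
    gget g ((a:Int)+1) ((b:Int)+1) = get2 'x' g (a+1) (b+1) := by
  rw [show ((a:Int)+1) = (((a+1 : Nat)) : Int) by push_cast; ring,
      show ((b:Int)+1) = (((b+1 : Nat)) : Int) by push_cast; ring, gget_cast]

theorem anchor_prop (g : List (List Char)) (a b : Nat) :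
    (((¬ get2 'x' g a b = 'x' ∧ get2 'x' g a b = get2 'x' g (a+1) b) ∧
      get2 'x' g a b = get2 'x' g a (b+1)) ∧ get2 'x' g a b = get2 'x' g (a+1) (b+1))
    ↔ anchorOK g a b = true := by
  unfold anchorOK
  simp only [Bool.and_eq_true, bne_iff_ne, beq_iff_eq, ne_eq]
  tauto
-- the used-matrix A builds is buildUsed
theorem usedA_eq (M N : Nat) (g : List (List Char)) :
    ((PySem.List.pyRange 0 ((M : Int) - 1) 1).foldl (fun used i =>
      (PySem.List.pyRange 0 ((N : Int) - 1) 1).foldl (fun used j =>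
        if gget g i j ≠ 'x' then
          let checkCnt : Int := [((0:Int),(1:Int)),(1,0),(1,1)].foldl (fun cs ch =>
            if gget g i j == gget g (i + ch.1) (j + ch.2) then cs + 1 else cs) 0
          if checkCnt == 3 then
            [((0:Int),(1:Int)),(1,0),(1,1)].foldl (fun used ch => uset used (i + ch.1) (j + ch.2) 1)
              (uset used i j 1)
          else used
        else used) used)
      ((PySem.List.pyRange 0 (M : Int) 1).map (fun _ => PySem.List.pyRepeat [0] (N : Int))))
    = buildUsed g M N := by
  have hM1 : ((M:Int) - 1).toNat = M - 1 := by omega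
  have hN1 : ((N:Int) - 1).toNat = N - 1 := by omega
  have hinit : (PySem.List.pyRange 0 (M:Int) 1).map (fun _ => PySem.List.pyRepeat [0] (N:Int))
      = List.replicate M (List.replicate N (0:Int)) := by
    rw [map_pyRange0]
    apply List.eq_replicate_iff.mpr
    refine ⟨by simp, ?_⟩
    intro r hr
    obtain ⟨k, _, rfl⟩ := List.mem_map.mp hr
    rw [PySem.List.pyRepeat_singleton]
    simp
  rw [hinit, foldl_pyRange0, hM1]
  unfold buildUsed anchorPairs
  rw [List.foldl_flatMap]
  simp only [List.foldl_map]
  apply PySem.List.foldl_congr_mem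
  intro u i _
  rw [foldl_pyRange0, hN1]
  apply PySem.List.foldl_congr_mem
  intro u' j _
  simp only [List.foldl_cons, List.foldl_nil]
  by_cases h0 : get2 'x' g i j = 'x'
  · rw [if_neg (by rw [gget_cast]; simpa using h0), if_neg (by
      unfold anchorOK
      simp [h0])]
  · rw [if_pos (by rw [gget_cast]; simpa using h0)]
    simp only [gget_cast, gget_addone_left, gget_addone_right, gget_addone_both,
      uset_cast, uset_addone_left, uset_addone_right, uset_addone_both, add_zero]
    cases hc1 : (get2 'x' g i j == get2 'x' g i (j+1)) <;>
      cases hc2 : (get2 'x' g i j == get2 'x' g (i+1) j) <;>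
        cases hc3 : (get2 'x' g i j == get2 'x' g (i+1) (j+1)) <;>
          simp only [hc1, hc2, hc3, if_true, if_false, Bool.false_eq_true, Bool.true_eq_false] <;>
          [ rw [if_neg ?c1, if_neg ?a1]; rw [if_neg ?c2, if_neg ?a2]; rw [if_neg ?c3, if_neg ?a3];
            rw [if_neg ?c4, if_neg ?a4]; rw [if_neg ?c5, if_neg ?a5]; rw [if_neg ?c6, if_neg ?a6];
            rw [if_neg ?c7, if_neg ?a7]; rw [if_pos ?c8, if_pos ?a8] ]
    case c1 => decide
    case c2 => decide
    case c3 => decide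
    case c4 => decide
    case c5 => decide
    case c6 => decide
    case c7 => decide
    case c8 => decide
    case a8 => unfold anchorOK; simp [h0, hc1, hc2, hc3]
    all_goals first | rfl | (unfold anchorOK; simp [h0, hc1, hc2, hc3])
-- ---- B's covered test ----
theorem covB_iff (g : List (List Char)) (M N i j : Nat) :
    coveredB (M : Int) (N : Int) g (i : Int) (j : Int) = true ↔ CovP g M N i j := by
  unfold coveredB
  simp only [List.any_cons, List.any_nil, Bool.or_false, Bool.or_eq_true, Bool.and_eq_true,
    decide_eq_true_eq, bne_iff_ne, beq_iff_eq, ne_eq]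
  constructor
  · intro h
    rcases h with ((h | h) | (h | h))
    · obtain ⟨⟨⟨⟨hi0, hiM⟩, hj0⟩, hjN⟩, hA⟩ := h
      have ei : ((i:Int) - 1) = ((i-1 : Nat) : Int) := by omega
      have ej : ((j:Int) - 1) = ((j-1 : Nat) : Int) := by omega
      rw [ei, ej] at hA
      simp only [gget_cast, gget_addone_left, gget_addone_right, gget_addone_both] at hA
      exact ⟨i-1, j-1, by omega, by omega, Or.inr (by omega), Or.inr (by omega),
        (anchor_prop g (i-1) (j-1)).mp hA⟩
    · obtain ⟨⟨⟨⟨hi0, hiM⟩, hj0⟩, hjN⟩, hA⟩ := h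
      have ei : ((i:Int) - 1) = ((i-1 : Nat) : Int) := by omega
      rw [ei] at hA
      simp only [gget_cast, gget_addone_left, gget_addone_right, gget_addone_both] at hA
      exact ⟨i-1, j, by omega, by omega, Or.inr (by omega), Or.inl rfl,
        (anchor_prop g (i-1) j).mp hA⟩
    · obtain ⟨⟨⟨⟨hi0, hiM⟩, hj0⟩, hjN⟩, hA⟩ := h
      have ej : ((j:Int) - 1) = ((j-1 : Nat) : Int) := by omega
      rw [ej] at hA
      simp only [gget_cast, gget_addone_left, gget_addone_right, gget_addone_both] at hA
      exact ⟨i, j-1, by omega, by omega, Or.inl rfl, Or.inr (by omega),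
        (anchor_prop g i (j-1)).mp hA⟩
    · obtain ⟨⟨⟨⟨hi0, hiM⟩, hj0⟩, hjN⟩, hA⟩ := h
      simp only [gget_cast, gget_addone_left, gget_addone_right, gget_addone_both] at hA
      exact ⟨i, j, by omega, by omega, Or.inl rfl, Or.inl rfl,
        (anchor_prop g i j).mp hA⟩
  · rintro ⟨a, b, hA, hB, ha, hb, hOK⟩
    have hP := (anchor_prop g a b).mpr hOK
    rcases ha with rfl | ha
    · rcases hb with rfl | hb
      · refine Or.inr (Or.inr ?_)
        simp only [gget_cast, gget_addone_left, gget_addone_right, gget_addone_both]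
        exact ⟨⟨⟨⟨by omega, by omega⟩, by omega⟩, by omega⟩, hP⟩
      · refine Or.inr (Or.inl ?_)
        have ej : ((j:Int) - 1) = ((b : Nat) : Int) := by omega
        rw [ej]
        simp only [gget_cast, gget_addone_left, gget_addone_right, gget_addone_both]
        exact ⟨⟨⟨⟨by omega, by omega⟩, by omega⟩, by omega⟩, hP⟩
    · rcases hb with rfl | hb
      · refine Or.inl (Or.inr ?_)
        have ei : ((i:Int) - 1) = ((a : Nat) : Int) := by omega
        rw [ei]
        simp only [gget_cast, gget_addone_left, gget_addone_right, gget_addone_both]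
        exact ⟨⟨⟨⟨by omega, by omega⟩, by omega⟩, by omega⟩, hP⟩
      · refine Or.inl (Or.inl ?_)
        have ei : ((i:Int) - 1) = ((a : Nat) : Int) := by omega
        have ej : ((j:Int) - 1) = ((b : Nat) : Int) := by omega
        rw [ei, ej]
        simp only [gget_cast, gget_addone_left, gget_addone_right, gget_addone_both]
        exact ⟨⟨⟨⟨by omega, by omega⟩, by omega⟩, by omega⟩, hP⟩

-- ---- the marking scan ----
def markScan (u : List (List Int)) (g : List (List Char)) (M N : Nat) : List (List Char) :=
  (List.range M).foldl (fun b i => (List.range N).foldl (fun b j =>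
    if get2 0 u i j == 1 then set2 b i j 'x' else b) b) g

theorem scanAux (u : List (List Int)) {M N : Nat} : ∀ (L : List (Nat × Nat))
    (b : List (List Char)), ShapeN M N b → (∀ p ∈ L, p.1 < M ∧ p.2 < N) →
    ShapeN M N (L.foldl (fun b p => if get2 0 u p.1 p.2 == 1 then set2 b p.1 p.2 'x' else b) b) ∧
    ∀ i j : Nat,
      get2 'x' (L.foldl (fun b p => if get2 0 u p.1 p.2 == 1 then set2 b p.1 p.2 'x' else b) b) i j
        = if (i, j) ∈ L ∧ get2 0 u i j = 1 then 'x' else get2 'x' b i j := by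
  intro L
  induction L with
  | nil => intro b hb _; exact ⟨hb, fun i j => by simp⟩
  | cons p L ih =>
    intro b hb hL
    have hp := hL p (by simp)
    have hb' : ShapeN M N (if get2 0 u p.1 p.2 == 1 then set2 b p.1 p.2 'x' else b) := by
      split
      · exact shape_set2 hb _ _ _ hp.1
      · exact hb
    obtain ⟨hsh, hch⟩ := ih _ hb' (fun q hq => hL q (by simp [hq]))
    refine ⟨by simpa using hsh, fun i j => ?_⟩
    rw [List.foldl_cons, hch i j]
    by_cases h1 : (i, j) ∈ L ∧ get2 0 u i j = 1
    · rw [if_pos h1, if_pos ⟨by simp [h1.1], h1.2⟩]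
    · rw [if_neg h1]
      by_cases hpe : p = (i, j)
      · by_cases hcond : get2 0 u i j = 1
        · rw [if_pos (show (get2 0 u p.1 p.2 == 1) = true by rw [hpe]; simpa using hcond),
              get2_set2 hb 'x' i j 'x' hp.1 hp.2,
              if_pos ⟨by rw [hpe], by rw [hpe]⟩,
              if_pos ⟨by rw [hpe]; exact List.mem_cons_self .., hcond⟩]
        · rw [if_neg (show ¬(get2 0 u p.1 p.2 == 1) = true by rw [hpe]; simpa using hcond),
              if_neg (by
                rintro ⟨hm, hc⟩
                rcases List.mem_cons.mp hm with he | he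
                · exact hcond hc
                · exact h1 ⟨he, hc⟩)]
      · have hrw : get2 'x' (if get2 0 u p.1 p.2 == 1 then set2 b p.1 p.2 'x' else b) i j
            = get2 'x' b i j := by
          split
          · rw [get2_set2 hb 'x' i j 'x' hp.1 hp.2, if_neg (by
              rintro ⟨h2, h3⟩; exact hpe (by rw [← h2, ← h3]))]
          · rfl
        rw [hrw, if_neg (by
          rintro ⟨hm, hc⟩
          rcases List.mem_cons.mp hm with he | he
          · exact hpe he.symm
          · exact h1 ⟨he, hc⟩)]

def cellPairs (M N : Nat) : List (Nat × Nat) :=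
  (List.range M).flatMap (fun i => (List.range N).map (fun j => (i, j)))

theorem markScan_pairs (u : List (List Int)) (g : List (List Char)) (M N : Nat) :
    markScan u g M N = (cellPairs M N).foldl
      (fun b p => if get2 0 u p.1 p.2 == 1 then set2 b p.1 p.2 'x' else b) g := by
  unfold markScan cellPairs
  rw [List.foldl_flatMap]
  simp only [List.foldl_map]

theorem mem_cellPairs (M N i j : Nat) : (i, j) ∈ cellPairs M N ↔ i < M ∧ j < N := by
  simp [cellPairs, List.mem_flatMap]

theorem markScan_props (u : List (List Int)) (M N : Nat) (g : List (List Char))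
    (h : ShapeN M N g) :
    ShapeN M N (markScan u g M N) ∧
    ∀ i j : Nat, i < M → j < N →
      get2 'x' (markScan u g M N) i j
        = if get2 0 u i j == 1 then 'x' else get2 'x' g i j := by
  have hmem : ∀ p ∈ cellPairs M N, p.1 < M ∧ p.2 < N := by
    intro p hp
    have := (mem_cellPairs M N p.1 p.2).mp (by simpa using hp)
    exact this
  obtain ⟨hsh, hch⟩ := scanAux u (cellPairs M N) g h hmem
  rw [← markScan_pairs] at hsh hch
  refine ⟨hsh, fun i j hi hj => ?_⟩
  rw [hch i j]
  by_cases hc : get2 0 u i j = 1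
  · rw [if_pos ⟨(mem_cellPairs M N i j).mpr ⟨hi, hj⟩, hc⟩, if_pos (by simpa using hc)]
  · rw [if_neg (by rintro ⟨_, h2⟩; exact hc h2), if_neg (by simpa using hc)]

theorem get2_mapmap {α : Type} (d : α) (M N : Nat) (f : Nat → Nat → α) (i j : Nat)
    (hi : i < M) (hj : j < N) :
    get2 d ((List.range M).map (fun i => (List.range N).map (fun j => f i j))) i j = f i j := by
  unfold get2
  rw [List.getD_eq_getElem?_getD (l := (List.range M).map _) (i := i)]
  simp [List.getElem?_map, List.getElem?_range, hi, hj, List.getD_eq_getElem?_getD]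

theorem shape_mapmap {α : Type} (M N : Nat) (f : Nat → Nat → α) :
    ShapeN M N ((List.range M).map (fun i => (List.range N).map (fun j => f i j))) := by
  refine ⟨by simp, fun r hr => ?_⟩
  obtain ⟨i, _, rfl⟩ := List.mem_map.mp hr
  simp

-- ---- columns, gravity ----
def ftop (cs : List Char) : Nat → Nat
  | 0 => 0
  | k + 1 => if cs.getD k 'x' == 'x' then ftop cs k else k + 1

def gstep (cs : List Char) (i : Nat) : List Char :=
  if cs.getD i 'x' == 'x' then
    (if 1 ≤ ftop cs i then (cs.set i (cs.getD (ftop cs i - 1) 'x')).set (ftop cs i - 1) 'x' else cs)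
  else cs

def gpass (M : Nat) (cs : List Char) : List Char := ((List.range M).reverse).foldl gstep cs

def compactC (M : Nat) (cs : List Char) : List Char :=
  List.replicate (M - (cs.filter (fun ch => ch != 'x')).length) 'x'
    ++ cs.filter (fun ch => ch != 'x')

def colOf (g : List (List Char)) (j : Nat) : List Char := g.map (fun r => r.getD j 'x')

def setCol (g : List (List Char)) (j : Nat) (cs : List Char) : List (List Char) :=
  List.zipWith (fun r v => r.set j v) g cs

theorem colOf_getD (g : List (List Char)) (j i : Nat) :
    (colOf g j).getD i 'x' = get2 'x' g i j := by
  unfold colOf get2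
  by_cases hi : i < g.length
  · simp [List.getD_eq_getElem?_getD, List.getElem?_eq_getElem hi]
  · have h1 : g[i]? = none := List.getElem?_eq_none (by omega)
    simp [List.getD_eq_getElem?_getD, h1]

theorem length_colOf (g : List (List Char)) (j : Nat) : (colOf g j).length = g.length := by
  simp [colOf]

theorem colOf_eq_map {M : Nat} {g : List (List Char)} (hlen : g.length = M) (j : Nat) :
    colOf g j = (List.range M).map (fun i => get2 'x' g i j) := by
  apply List.ext_getElem (by simp [colOf, hlen])
  intro i h1 h2
  unfold colOf
  rw [List.getElem_map, List.getElem_map, List.getElem_range]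
  have hig : i < g.length := by simp [colOf] at h1; omega
  unfold get2
  rw [List.getD_eq_getElem?_getD (l := g) (i := i), List.getElem?_eq_getElem hig]
  rfl


theorem findTopA_eq (g : List (List Char)) (j : Nat) : ∀ k : Nat,
    findTopA g (j : Int) k = ftop (colOf g j) k := by
  intro k
  induction k with
  | zero => rfl
  | succ k ih => rw [findTopA, ftop, gget_cast, colOf_getD, ih]

theorem length_gstep (cs : List Char) (i : Nat) : (gstep cs i).length = cs.length := by
  unfold gstep; split <;> [skip; rfl]; split <;> simp

-- ---- setCol lemmas ----
theorem length_setCol (g : List (List Char)) (j : Nat) (cs : List Char)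
    (hc : cs.length = g.length) : (setCol g j cs).length = g.length := by
  simp [setCol, hc]

theorem mem_zipWith_set {j : Nat} : ∀ {g : List (List Char)} {cs : List Char}
    {r : List Char}, r ∈ List.zipWith (fun r v => r.set j v) g cs →
    ∃ a ∈ g, ∃ v, r = a.set j v := by
  intro g
  induction g with
  | nil => intro cs r h; simp at h
  | cons a g ih =>
    intro cs r h
    cases cs with
    | nil => simp at h
    | cons v cs =>
      rcases List.mem_cons.mp h with h | h
      · exact ⟨a, by simp, v, h⟩
      · obtain ⟨a', ha', v', hv'⟩ := ih h
        exact ⟨a', by simp [ha'], v', hv'⟩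

theorem shape_setCol {M N : Nat} {g : List (List Char)} (h : ShapeN M N g) (j : Nat)
    {cs : List Char} (hc : cs.length = M) : ShapeN M N (setCol g j cs) := by
  refine ⟨by rw [length_setCol g j cs (by rw [hc, ← h.1]), h.1], fun r hr => ?_⟩
  obtain ⟨a, ha, v, rfl⟩ := mem_zipWith_set hr
  simp [h.2 _ ha]

theorem get2_eq_getElem {α : Type} (d : α) {g : List (List α)} {i j : Nat}
    (hi : i < g.length) (hj : j < g[i].length) : get2 d g i j = g[i][j] := by
  unfold get2
  rw [List.getD_eq_getElem?_getD (l := g) (i := i), List.getElem?_eq_getElem hi]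
  simp [List.getD_eq_getElem?_getD, List.getElem?_eq_getElem hj]

theorem get2_setCol {M N : Nat} {g : List (List Char)} (h : ShapeN M N g) {j : Nat}
    (hj : j < N) {cs : List Char} (hc : cs.length = M) (i j' : Nat) :
    get2 'x' (setCol g j cs) i j' = if j' = j then cs.getD i 'x' else get2 'x' g i j' := by
  have hlen : (setCol g j cs).length = g.length := length_setCol g j cs (by rw [hc, ← h.1])
  have hgl : g.length = M := h.1
  by_cases hi : i < M
  · have hig : i < g.length := by omega
    have hic : i < cs.length := by omega
    have hiz : i < (setCol g j cs).length := by omega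
    have hrow : (setCol g j cs)[i]'(hiz) = (g[i]'(hig)).set j (cs[i]'(hic)) := by
      simp [setCol, List.getElem_zipWith]
    have hrl : (g[i]'(hig)).length = N := h.2 _ (List.getElem_mem _)
    unfold get2
    rw [List.getD_eq_getElem?_getD (l := setCol g j cs) (i := i), List.getElem?_eq_getElem hiz]
    simp only [Option.getD_some]
    rw [hrow, getD_set]
    rw [List.getD_eq_getElem?_getD (l := g) (i := i), List.getElem?_eq_getElem hig]
    simp only [Option.getD_some]
    by_cases hjj : j' = j
    · subst hjj
      rw [if_pos ⟨rfl, by omega⟩, if_pos rfl]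
      try simp [List.getD_eq_getElem?_getD, List.getElem?_eq_getElem hic]
    · rw [if_neg (by tauto), if_neg hjj]
      try simp
  · have h1 : (setCol g j cs)[i]? = none := List.getElem?_eq_none (by omega)
    have h2 : g[i]? = none := List.getElem?_eq_none (by omega)
    have h3 : cs.getD i 'x' = 'x' := by
      rw [List.getD_eq_getElem?_getD, List.getElem?_eq_none (by omega)]; rfl
    unfold get2
    rw [List.getD_eq_getElem?_getD (l := setCol g j cs) (i := i), h1,
        List.getD_eq_getElem?_getD (l := g) (i := i), h2]
    rw [List.getD_eq_getElem?_getD] at h3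
    simp [h3]

theorem setCol_setCol (g : List (List Char)) (j : Nat) (cs d : List Char)
    (hc : cs.length = g.length) : setCol (setCol g j cs) j d = setCol g j d := by
  induction g generalizing cs d with
  | nil => simp [setCol]
  | cons r g ih =>
    cases cs with
    | nil => simp at hc
    | cons v cs =>
      cases d with
      | nil => simp [setCol]
      | cons w d =>
        simp only [setCol, List.zipWith_cons_cons, List.set_set]
        exact congrArg _ (ih cs d (by simpa using hc))

theorem setCol_colOf' (g : List (List Char)) (j : Nat) (h : ∀ r ∈ g, j < r.length) :
    setCol g j (colOf g j) = g := by
  induction g with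
  | nil => rfl
  | cons r g ih =>
    have hr : j < r.length := h r (by simp)
    simp only [setCol, colOf, List.map_cons, List.zipWith_cons_cons]
    congr 1
    · rw [List.getD_eq_getElem?_getD, List.getElem?_eq_getElem hr]
      exact List.set_getElem_self hr
    · exact ih (fun r hr => h r (by simp [hr]))

theorem setCol_colOf {M N : Nat} {g : List (List Char)} (h : ShapeN M N g) {j : Nat}
    (hj : j < N) : setCol g j (colOf g j) = g :=
  setCol_colOf' g j (fun r hr => by rw [h.2 _ hr]; exact hj)

theorem colOf_setCol_same' (g : List (List Char)) (j : Nat) (cs : List Char)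
    (hc : cs.length = g.length) (h : ∀ r ∈ g, j < r.length) : colOf (setCol g j cs) j = cs := by
  induction g generalizing cs with
  | nil => cases cs with | nil => rfl | cons v cs => simp at hc
  | cons r g ih =>
    cases cs with
    | nil => simp at hc
    | cons v cs =>
      have hr : j < r.length := h r (by simp)
      simp only [setCol, colOf, List.zipWith_cons_cons, List.map_cons, List.cons.injEq]
      constructor
      · rw [getD_set, if_pos ⟨rfl, by simpa using hr⟩]
      · exact ih cs (by simpa using hc) (fun r hr => h r (by simp [hr]))

theorem colOf_setCol_same {M N : Nat} {g : List (List Char)} (h : ShapeN M N g) {j : Nat}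
    (hj : j < N) {cs : List Char} (hc : cs.length = M) : colOf (setCol g j cs) j = cs :=
  colOf_setCol_same' g j cs (by rw [hc, ← h.1]) (fun r hr => by rw [h.2 _ hr]; exact hj)

theorem colOf_setCol_ne (g : List (List Char)) {j j' : Nat} (hne : j' ≠ j) (cs : List Char)
    (hc : cs.length = g.length) : colOf (setCol g j cs) j' = colOf g j' := by
  induction g generalizing cs with
  | nil => simp [setCol, colOf]
  | cons r g ih =>
    cases cs with
    | nil => simp at hc
    | cons v cs =>
      simp only [setCol, colOf, List.zipWith_cons_cons, List.map_cons, List.cons.injEq]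
      constructor
      · rw [getD_set, if_neg (by tauto)]
      · exact ih cs (by simpa using hc)

theorem grid_ext {M N : Nat} {g1 g2 : List (List Char)} (h1 : ShapeN M N g1)
    (h2 : ShapeN M N g2)
    (h : ∀ i j : Nat, i < M → j < N → get2 'x' g1 i j = get2 'x' g2 i j) : g1 = g2 := by
  have e1 := h1.1
  apply List.ext_getElem (by rw [h1.1, h2.1])
  intro i hi1 hi2
  have hr1 : g1[i].length = N := h1.2 _ (List.getElem_mem _)
  have hr2 : g2[i].length = N := h2.2 _ (List.getElem_mem _)
  apply List.ext_getElem (by rw [hr1, hr2])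
  intro j hj1 hj2
  have := h i j (by omega) (by omega)
  rwa [get2_eq_getElem 'x' hi1 hj1, get2_eq_getElem 'x' hi2 hj2] at this

theorem set2_setCol {M N : Nat} {g : List (List Char)} (h : ShapeN M N g) {i j : Nat}
    (hi : i < M) (hj : j < N) {cs : List Char} (hc : cs.length = M) (v : Char) :
    set2 (setCol g j cs) i j v = setCol g j (cs.set i v) := by
  have hsc : ShapeN M N (setCol g j cs) := shape_setCol h j hc
  apply grid_ext (shape_set2 hsc i j v hi) (shape_setCol h j (by simp [hc]))
  intro p q hp hq
  rw [get2_setCol (cs := cs.set i v) h hj (by simp [hc]) p q,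
      get2_set2 hsc 'x' p q v hi hj, get2_setCol (cs := cs) h hj hc p q, getD_set]
  split_ifs <;> first | rfl | omega

-- ---- A's per-column bubbling = gstep on the column ----
def bodyAN (g : List (List Char)) (j i : Nat) : List (List Char) :=
  if get2 'x' g i j == 'x' then
    (if 1 ≤ ftop (colOf g j) i then
      set2 (set2 g i j (get2 'x' g (ftop (colOf g j) i - 1) j)) (ftop (colOf g j) i - 1) j 'x'
    else g)
  else g

theorem ftop_le (cs : List Char) (i : Nat) : ftop cs i ≤ i := by
  induction i with
  | zero => simp [ftop]
  | succ k ih => rw [ftop]; split <;> omega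

theorem bodyAN_setCol {M N : Nat} {g : List (List Char)} (h : ShapeN M N g) {i j : Nat}
    (hi : i < M) (hj : j < N) : bodyAN g j i = setCol g j (gstep (colOf g j) i) := by
  have hcl : (colOf g j).length = M := by rw [length_colOf, h.1]
  unfold bodyAN gstep
  rw [colOf_getD]
  by_cases hx : (get2 'x' g i j == 'x') = true
  · rw [if_pos hx, if_pos hx]
    by_cases h1 : 1 ≤ ftop (colOf g j) i
    · rw [if_pos h1, if_pos h1]
      have hkM : ftop (colOf g j) i - 1 < M := by
        have := ftop_le (colOf g j) i; omega
      rw [colOf_getD]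
      have e1 := set2_setCol (cs := colOf g j) h hi hj hcl
        (get2 'x' g (ftop (colOf g j) i - 1) j)
      rw [setCol_colOf h hj] at e1
      rw [e1]
      exact set2_setCol (i := ftop (colOf g j) i - 1) h hkM hj (by simp [hcl]) 'x'
    · rw [if_neg h1, if_neg h1, setCol_colOf h hj]
  · rw [if_neg hx, if_neg hx, setCol_colOf h hj]

theorem length_foldl_gstep : ∀ (I : List Nat) (cs : List Char),
    (I.foldl gstep cs).length = cs.length := by
  intro I
  induction I with
  | nil => intro cs; rfl
  | cons i I ih => intro cs; rw [List.foldl_cons, ih, length_gstep]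

theorem colpass {M N : Nat} (j : Nat) (hj : j < N) :
    ∀ (I : List Nat) (g : List (List Char)), ShapeN M N g → (∀ i ∈ I, i < M) →
    I.foldl (fun b i => bodyAN b j i) g = setCol g j (I.foldl gstep (colOf g j)) := by
  intro I
  induction I with
  | nil => intro g hg _; exact (setCol_colOf hg hj).symm
  | cons i I ih =>
    intro g hg hI
    have hi : i < M := hI i (by simp)
    have hcl : (colOf g j).length = M := by rw [length_colOf, hg.1]
    have hgl : (gstep (colOf g j) i).length = M := by rw [length_gstep, hcl]
    have hsh : ShapeN M N (setCol g j (gstep (colOf g j) i)) := shape_setCol hg j hgl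
    rw [List.foldl_cons, List.foldl_cons, bodyAN_setCol hg hi hj,
        ih _ hsh (fun x hx => hI x (by simp [hx])),
        colOf_setCol_same hg hj hgl,
        setCol_setCol _ _ _ _ (by rw [hgl, hg.1])]

theorem gravFold {M N : Nat} : ∀ (J : List Nat) (b : List (List Char)), ShapeN M N b →
    (∀ j ∈ J, j < N) → J.Nodup →
    ShapeN M N (J.foldl (fun b j => setCol b j (gpass M (colOf b j))) b) ∧
    (∀ j ∈ J, colOf (J.foldl (fun b j => setCol b j (gpass M (colOf b j))) b) j
        = gpass M (colOf b j)) ∧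
    (∀ j, j ∉ J → colOf (J.foldl (fun b j => setCol b j (gpass M (colOf b j))) b) j
        = colOf b j) := by
  intro J
  induction J with
  | nil => intro b hb _ _; exact ⟨hb, by simp, fun j _ => rfl⟩
  | cons j J ih =>
    intro b hb hJ hnd
    have hjN : j < N := hJ j (by simp)
    have hcl : (colOf b j).length = M := by rw [length_colOf, hb.1]
    have hgl : (gpass M (colOf b j)).length = M := by
      rw [gpass, length_foldl_gstep, hcl]
    have hb1 : ShapeN M N (setCol b j (gpass M (colOf b j))) := shape_setCol hb j hgl
    obtain ⟨s1, s2, s3⟩ := ih _ hb1 (fun x hx => hJ x (by simp [hx])) hnd.of_cons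
    refine ⟨by simpa using s1, ?_, ?_⟩
    · intro j' hj'
      rcases List.mem_cons.mp hj' with rfl | hj'
      · rw [List.foldl_cons, s3 j' (List.nodup_cons.mp hnd).1,
            colOf_setCol_same hb hjN hgl]
      · rw [List.foldl_cons, s2 j' hj',
            colOf_setCol_ne b (fun hh => (List.nodup_cons.mp hnd).1 (by rw [← hh]; exact hj')) _
              (by rw [hgl, hb.1])]
    · intro j' hj'
      have hne : j' ≠ j := fun hh => hj' (by rw [hh]; exact List.mem_cons_self ..)
      rw [List.foldl_cons, s3 j' (fun hh => hj' (List.mem_cons_of_mem _ hh)),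
          colOf_setCol_ne b hne _ (by rw [hgl, hb.1])]

theorem gravA_to_model {M N : Nat} : ∀ (J : List Nat) (b : List (List Char)), ShapeN M N b →
    (∀ j ∈ J, j < N) →
    J.foldl (fun b j => ((List.range M).reverse).foldl (fun b i => bodyAN b j i) b) b
      = J.foldl (fun b j => setCol b j (gpass M (colOf b j))) b := by
  intro J
  induction J with
  | nil => intro b _ _; rfl
  | cons j J ih =>
    intro b hb hJ
    have hjN : j < N := hJ j (by simp)
    have hme : ∀ i ∈ (List.range M).reverse, i < M := by simp
    rw [List.foldl_cons, List.foldl_cons, colpass j hjN _ b hb hme]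
    have hgl : ((List.range M).reverse.foldl gstep (colOf b j)).length = M := by
      rw [length_foldl_gstep, length_colOf, hb.1]
    exact ih _ (shape_setCol hb j hgl) (fun x hx => hJ x (by simp [hx]))

-- ---- ftop spec and gpass = compactC ----
theorem ftop_run (cs : List Char) (i : Nat) :
    ∀ t : Nat, ftop cs i ≤ t → t < i → cs.getD t 'x' = 'x' := by
  induction i with
  | zero => intro t _ ht; omega
  | succ k ih =>
    intro t h1 h2
    rw [ftop] at h1
    by_cases hc : (cs.getD k 'x' == 'x') = true
    · rw [if_pos hc] at h1
      by_cases htk : t < k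
      · exact ih t h1 htk
      · have : t = k := by omega
        subst this; exact beq_iff_eq.mp hc
    · rw [if_neg hc] at h1; omega

theorem ftop_stop (cs : List Char) (i : Nat) (h : 1 ≤ ftop cs i) :
    ¬ cs.getD (ftop cs i - 1) 'x' = 'x' := by
  induction i with
  | zero => simp [ftop] at h
  | succ k ih =>
    rw [ftop] at h ⊢
    by_cases hc : (cs.getD k 'x' == 'x') = true
    · rw [if_pos hc] at h ⊢; exact ih h
    · rw [if_neg hc] at h ⊢
      simpa using fun hx => hc (beq_iff_eq.mpr hx)

def GInv (i : Nat) (cs : List Char) : Prop :=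
  ∃ t, cs.drop i = List.replicate t 'x' ++ (cs.drop i).filter (fun ch => ch != 'x') ∧
    (0 < t → ∀ e ∈ cs.take i, e = 'x')

theorem mem_take_eq {cs : List Char} {i : Nat}
    (h : ∀ (t : Nat) (_ : t < i) (hl : t < cs.length), cs[t]'hl = 'x') :
    ∀ e ∈ cs.take i, e = 'x' := by
  intro e he
  obtain ⟨t, ht, he⟩ := List.mem_iff_getElem.mp he
  have ht' : t < i := by
    have := List.length_take (i := i) (l := cs); omega
  have ht2 : t < cs.length := by
    have := List.length_take (i := i) (l := cs); omega
  rw [List.getElem_take] at he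
  rw [← he]; exact h t ht' ht2

theorem gstep_inv {cs : List Char} {i : Nat} (hi : i < cs.length) (h : GInv (i+1) cs) :
    GInv i (gstep cs i) ∧ (gstep cs i).length = cs.length ∧
      (gstep cs i).filter (fun ch => ch != 'x') = cs.filter (fun ch => ch != 'x') := by
  obtain ⟨t, hdrop, hlink⟩ := h
  have hgetDi : cs.getD i 'x' = cs[i]'hi := by
    rw [List.getD_eq_getElem?_getD, List.getElem?_eq_getElem hi]; rfl
  have hdropi : cs.drop i = cs[i]'hi :: cs.drop (i+1) := List.drop_eq_getElem_cons hi
  by_cases hx : cs[i]'hi = 'x'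
  case neg =>
    -- cell i is not 'x': gstep does nothing
    have hg : gstep cs i = cs := by
      unfold gstep; rw [hgetDi, if_neg (by simpa using hx)]
    have hmem : cs[i]'hi ∈ cs.take (i+1) := List.mem_iff_getElem.mpr
      ⟨i, by rw [List.length_take]; omega, by rw [List.getElem_take]⟩
    have ht0 : t = 0 := by
      by_contra ht
      exact hx (hlink (by omega) _ hmem)
    refine ⟨⟨0, ?_, by omega⟩, by rw [hg], by rw [hg]⟩
    rw [hg, hdropi]
    subst ht0
    simp only [List.replicate_zero, List.nil_append] at hdrop ⊢
    rw [List.filter_cons_of_pos (by simpa using hx), ← hdrop]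
  case pos =>
    by_cases hk : 1 ≤ ftop cs i
    case neg =>
      -- whole prefix is 'x': gstep does nothing
      have hg : gstep cs i = cs := by
        unfold gstep; rw [hgetDi, if_pos (by simpa using hx), if_neg hk]
      have hrun : ∀ u : Nat, u < i → cs.getD u 'x' = 'x' :=
        fun u hu => ftop_run cs i u (by omega) hu
      refine ⟨⟨t + 1, ?_, ?_⟩, by rw [hg], by rw [hg]⟩
      · rw [hg, hdropi, hx]
        rw [List.filter_cons_of_neg (by simp)]
        rw [List.replicate_succ, List.cons_append]
        exact congrArg _ hdrop
      · intro _
        rw [hg]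
        apply mem_take_eq
        intro u hu hu2
        have := hrun u hu
        rwa [List.getD_eq_getElem?_getD, List.getElem?_eq_getElem hu2] at this
    case pos =>
      have hkle : ftop cs i ≤ i := ftop_le cs i
      have hpl : ftop cs i - 1 < cs.length := by omega
      have hpi : ftop cs i - 1 < i := by omega
      have hveq : cs.getD (ftop cs i - 1) 'x' = cs[ftop cs i - 1]'(hpl) := by
        rw [List.getD_eq_getElem?_getD, List.getElem?_eq_getElem hpl]; rfl
      have hvne : cs[ftop cs i - 1]'(hpl) ≠ 'x' := by
        have := ftop_stop cs i hk; rwa [hveq] at this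
      have hvne' : (cs[ftop cs i - 1]'(hpl) != 'x') = true := by simpa using hvne
      have hg : gstep cs i = (cs.set i (cs[ftop cs i - 1]'(hpl))).set (ftop cs i - 1) 'x' := by
        unfold gstep
        rw [hgetDi, if_pos (by simpa using hx), if_pos hk, hveq]
      have hmem : cs[ftop cs i - 1]'(hpl) ∈ cs.take (i+1) := List.mem_iff_getElem.mpr
        ⟨ftop cs i - 1, by rw [List.length_take]; omega, by rw [List.getElem_take]⟩
      have ht0 : t = 0 := by
        by_contra ht
        exact hvne (hlink (by omega) _ hmem)
      subst ht0
      simp only [List.replicate_zero, List.nil_append] at hdrop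
      set v : Char := cs[ftop cs i - 1]'(hpl) with hvdef
      have hdropp : cs.drop (ftop cs i - 1) = v :: cs.drop (ftop cs i) := by
        have := List.drop_eq_getElem_cons hpl
        rwa [show ftop cs i - 1 + 1 = ftop cs i by omega] at this
      have hmid : (cs.drop (ftop cs i)).take (i - ftop cs i)
          = List.replicate (i - ftop cs i) 'x' := by
        apply List.eq_replicate_iff.mpr
        refine ⟨by rw [List.length_take, List.length_drop]; omega, ?_⟩
        intro b hb
        obtain ⟨u, hu, hbe⟩ := List.mem_iff_getElem.mp hb
        rw [List.getElem_take, List.getElem_drop] at hbe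
        rw [List.length_take, List.length_drop] at hu
        have h2 : ftop cs i + u < i := by omega
        have := ftop_run cs i (ftop cs i + u) (by omega) h2
        rw [List.getD_eq_getElem?_getD, List.getElem?_eq_getElem (by omega)] at this
        rw [← hbe]; exact this
      have hdropk : cs.drop (ftop cs i)
          = List.replicate (i - ftop cs i) 'x' ++ 'x' :: cs.drop (i+1) := by
        conv_lhs => rw [← List.take_append_drop (i - ftop cs i) (cs.drop (ftop cs i))]
        rw [hmid, List.drop_drop, show ftop cs i + (i - ftop cs i) = i by omega, hdropi, hx]
      have hcs2 : cs = cs.take (ftop cs i - 1) ++ v ::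
          (List.replicate (i - ftop cs i) 'x' ++ 'x' :: cs.drop (i+1)) := by
        conv_lhs => rw [← List.take_append_drop (ftop cs i - 1) cs]
        rw [hdropp, hdropk]
      have lenA : (cs.take (ftop cs i - 1)).length = ftop cs i - 1 := by
        rw [List.length_take]; omega
      have e1 : cs.set i v = cs.take (ftop cs i - 1) ++
          v :: (List.replicate (i - ftop cs i) 'x' ++
            v :: cs.drop (i+1)) := by
        conv_lhs => rw [hcs2]
        rw [List.set_append, if_neg (by rw [lenA]; omega), lenA]
        congr 1
        rw [show i - (ftop cs i - 1) = (i - ftop cs i) + 1 by omega, List.set_cons_succ]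
        congr 1
        rw [List.set_append, if_neg (by rw [List.length_replicate]; omega),
            List.length_replicate, show i - ftop cs i - (i - ftop cs i) = 0 by omega,
            List.set_cons_zero]
      have e2 : (cs.set i v).set (ftop cs i - 1) 'x'
          = cs.take (ftop cs i - 1) ++ 'x' :: (List.replicate (i - ftop cs i) 'x' ++
            v :: cs.drop (i+1)) := by
        rw [e1, List.set_append, if_neg (by rw [lenA]; omega), lenA, Nat.sub_self,
            List.set_cons_zero]
      have filter_rep : ∀ n : Nat, (List.replicate n 'x').filter (fun ch => ch != 'x') = [] := by
        intro n; induction n with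
        | zero => rfl
        | succ n ih => rw [List.replicate_succ, List.filter_cons_of_neg (by simp), ih]
      have hlen2 : (cs.take (ftop cs i - 1) ++ 'x' ::
          List.replicate (i - ftop cs i) 'x').length = i := by
        rw [List.length_append, lenA, List.length_cons, List.length_replicate]; omega
      refine ⟨⟨0, ?_, by omega⟩, by rw [hg]; simp, ?_⟩
      · rw [hg, e2]
        have assoc : cs.take (ftop cs i - 1) ++ 'x' :: (List.replicate (i - ftop cs i) 'x' ++
            v :: cs.drop (i+1))
            = (cs.take (ftop cs i - 1) ++ 'x' :: List.replicate (i - ftop cs i) 'x') ++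
              v :: cs.drop (i+1) := by
          simp [List.append_assoc]
        rw [assoc, List.drop_left' hlen2]
        rw [List.replicate_zero, List.nil_append,
            List.filter_cons_of_pos (p := fun ch => ch != 'x') (by simpa using hvne)]
        exact congrArg _ hdrop
      · rw [hg, e2]
        conv_rhs => rw [hcs2]
        simp only [List.filter_append, List.filter_cons_of_neg (p := fun ch => ch != 'x')
            (a := 'x') (by simp),
            List.filter_cons_of_pos (p := fun ch => ch != 'x') (by simpa using hvne :
              ((fun ch => ch != 'x') v) = true), filter_rep]
        rfl

theorem gpassAux : ∀ (i : Nat) (cs : List Char), i ≤ cs.length → GInv i cs →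
    (((List.range i).reverse).foldl gstep cs).length = cs.length ∧
    (((List.range i).reverse).foldl gstep cs).filter (fun ch => ch != 'x')
      = cs.filter (fun ch => ch != 'x') ∧
    GInv 0 (((List.range i).reverse).foldl gstep cs) := by
  intro i
  induction i with
  | zero => intro cs _ h; exact ⟨rfl, rfl, h⟩
  | succ i ih =>
    intro cs hle h
    have hstep := gstep_inv (by omega) h
    have hrev : (List.range (i+1)).reverse = i :: (List.range i).reverse := by
      rw [List.range_succ, List.reverse_append]; rfl
    rw [hrev, List.foldl_cons]
    obtain ⟨l1, f1, g1⟩ := ih (gstep cs i) (by rw [hstep.2.1]; omega) hstep.1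
    exact ⟨by rw [l1, hstep.2.1], by rw [f1, hstep.2.2], g1⟩

theorem gpass_eq_compactC (M : Nat) (cs : List Char) (hc : cs.length = M) :
    gpass M cs = compactC M cs := by
  have h0 : GInv M cs := by
    refine ⟨0, ?_, by omega⟩
    rw [← hc, List.drop_length]; rfl
  obtain ⟨l1, f1, t, hdrop0, _⟩ := gpassAux M cs (by omega) h0
  rw [List.drop_zero] at hdrop0
  have hlen := congrArg List.length hdrop0
  rw [List.length_append, List.length_replicate] at hlen
  unfold gpass compactC
  rw [hdrop0, f1]
  congr 1
  congr 1
  rw [← f1]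
  omega

-- ---- assembling one round ----
def removedOf (m n : Int) (grid : List (List Char)) : Int :=
  (PySem.List.pyRange 0 m 1).foldl (fun acc i =>
    (PySem.List.pyRange 0 n 1).foldl (fun acc j =>
      if coveredB m n grid i j then acc + 1 else acc) acc) 0

def markedOf (m n : Int) (grid : List (List Char)) : List (List Char) :=
  (PySem.List.pyRange 0 m 1).map (fun i =>
    (PySem.List.pyRange 0 n 1).map (fun j =>
      if coveredB m n grid i j then 'x' else gget grid i j))

def colsOf (m n : Int) (grid : List (List Char)) : List (List Char) :=
  (PySem.List.pyRange 0 n 1).map (fun j =>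
    let keep := ((PySem.List.pyRange 0 m 1).filter
      (fun i => gget (markedOf m n grid) i j != 'x')).map
        (fun i => gget (markedOf m n grid) i j)
    PySem.List.pyRepeat ['x'] (m - (keep.length : Int)) ++ keep)

def gridOf (m n : Int) (grid : List (List Char)) : List (List Char) :=
  (PySem.List.pyRange 0 m 1).map (fun i =>
    (PySem.List.pyRange 0 n 1).map (fun j => gget (colsOf m n grid) j i))

theorem loopB_succ (m n : Int) (fuel : Nat) (grid : List (List Char)) (total : Int) :
    loopB m n (fuel + 1) grid total
      = if removedOf m n grid == 0 then total
        else loopB m n fuel (gridOf m n grid) (total + removedOf m n grid) := by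
  rfl

theorem shape_gridOf (M N : Nat) (g : List (List Char)) :
    ShapeN M N (gridOf (M : Int) (N : Int) g) := by
  unfold gridOf
  refine ⟨?_, ?_⟩
  · rw [map_pyRange0]; simp
  · intro r hr
    rw [map_pyRange0] at hr
    obtain ⟨k, _, rfl⟩ := List.mem_map.mp hr
    rw [map_pyRange0]; simp

theorem stfold_split (m n : Int) (u : List (List Int)) (g : List (List Char)) :
    (PySem.List.pyRange 0 m 1).foldl (fun st i => (PySem.List.pyRange 0 n 1).foldl (fun st j =>
      if uget u i j == 1 then (gset st.1 i j 'x', st.2 + 1) else st) st) (g, (0:Int))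
    = ((PySem.List.pyRange 0 m 1).foldl (fun b i => (PySem.List.pyRange 0 n 1).foldl (fun b j =>
        if uget u i j == 1 then gset b i j 'x' else b) b) g,
       (PySem.List.pyRange 0 m 1).foldl (fun cnt i => (PySem.List.pyRange 0 n 1).foldl (fun cnt j =>
        if uget u i j == 1 then cnt + 1 else cnt) cnt) 0) := by
  have e : (fun (st : List (List Char) × Int) (i : Int) =>
      (PySem.List.pyRange 0 n 1).foldl (fun st j =>
        if uget u i j == 1 then (gset st.1 i j 'x', st.2 + 1) else st) st)
      = (fun (st : List (List Char) × Int) (i : Int) =>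
        ((PySem.List.pyRange 0 n 1).foldl (fun b j =>
            if uget u i j == 1 then gset b i j 'x' else b) st.1,
         (PySem.List.pyRange 0 n 1).foldl (fun cnt j =>
            if uget u i j == 1 then cnt + 1 else cnt) st.2)) := by
    funext st i
    have e2 : (fun (st : List (List Char) × Int) (j : Int) =>
        if uget u i j == 1 then (gset st.1 i j 'x', st.2 + 1) else st)
        = (fun (st : List (List Char) × Int) (j : Int) =>
          (if uget u i j == 1 then gset st.1 i j 'x' else st.1,
           if uget u i j == 1 then st.2 + 1 else st.2)) := by
      funext st j; split <;> rfl
    obtain ⟨a, b⟩ := st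
    rw [e2, PySem.List.foldl_prod_mk
      (f := fun b j => if uget u i j == 1 then gset b i j 'x' else b)
      (g := fun cnt j => if uget u i j == 1 then cnt + 1 else cnt)]
  rw [e, PySem.List.foldl_prod_mk
    (f := fun b i => (PySem.List.pyRange 0 n 1).foldl
      (fun b j => if uget u i j == 1 then gset b i j 'x' else b) b)
    (g := fun cnt i => (PySem.List.pyRange 0 n 1).foldl
      (fun cnt j => if uget u i j == 1 then cnt + 1 else cnt) cnt)]

theorem hpredB (M N : Nat) (g : List (List Char)) (i j : Nat) :
    (uget (buildUsed g M N) (i : Int) (j : Int) == 1) = coveredB (M : Int) (N : Int) g i j := by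
  have h1 := buildUsed_char g M N i j
  have h2 := covB_iff g M N i j
  rw [uget_cast]
  by_cases hc : get2 0 (buildUsed g M N) i j = 1
  · rw [h2.mpr (h1.mp hc)]; simp [hc]
  · have hf : coveredB (M : Int) (N : Int) g i j = false := by
      rcases Bool.eq_false_or_eq_true (coveredB (M : Int) (N : Int) g i j) with hb | hb
      · exact absurd (h1.mpr (h2.mp hb)) hc
      · exact hb
    rw [hf]; simp [hc]

theorem cntA_eq_removed (M N : Nat) (g : List (List Char)) :
    (PySem.List.pyRange 0 (M:Int) 1).foldl (fun cnt i => (PySem.List.pyRange 0 (N:Int) 1).foldl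
      (fun cnt j => if uget (buildUsed g M N) i j == 1 then cnt + 1 else cnt) cnt) 0
    = removedOf (M : Int) (N : Int) g := by
  unfold removedOf
  rw [foldl_pyRange0, foldl_pyRange0]
  congr 1
  funext cnt iN
  rw [foldl_pyRange0, foldl_pyRange0]
  congr 1
  funext cnt2 jN
  rw [hpredB M N g iN jN]

theorem markA_eq (M N : Nat) (u : List (List Int)) (g : List (List Char)) :
    (PySem.List.pyRange 0 (M:Int) 1).foldl (fun b i => (PySem.List.pyRange 0 (N:Int) 1).foldl
      (fun b j => if uget u i j == 1 then gset b i j 'x' else b) b) g = markScan u g M N := by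
  unfold markScan
  rw [foldl_pyRange0]
  congr 1
  funext b iN
  rw [foldl_pyRange0]
  congr 1
  funext b2 jN
  simp only [uget_cast, gset_cast]

theorem markedB_eq (M N : Nat) (g : List (List Char)) (h : ShapeN M N g) :
    (PySem.List.pyRange 0 (M:Int) 1).map (fun i => (PySem.List.pyRange 0 (N:Int) 1).map (fun j =>
      if coveredB (M:Int) (N:Int) g i j then 'x' else gget g i j))
    = markScan (buildUsed g M N) g M N := by
  obtain ⟨hsh, hch⟩ := markScan_props (buildUsed g M N) M N g h
  simp only [map_pyRange0]
  apply grid_ext (shape_mapmap M N _) hsh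
  intro i j hi hj
  rw [get2_mapmap _ _ _ _ _ _ hi hj, hch i j hi hj, gget_cast, ← hpredB M N g i j, uget_cast]

theorem getD_map_range' {α : Type} (N k : Nat) (f : Nat → α) (d : α) (hk : k < N) :
    ((List.range N).map f).getD k d = f k := by
  rw [List.getD_eq_getElem?_getD, List.getElem?_map, List.getElem?_range hk]; rfl

theorem colsOf_eq (M N : Nat) (g : List (List Char)) (h : ShapeN M N g) :
    colsOf (M:Int) (N:Int) g = (List.range N).map (fun jN =>
      compactC M (colOf (markScan (buildUsed g M N) g M N) jN)) := by
  obtain ⟨hsh, _⟩ := markScan_props (buildUsed g M N) M N g h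
  unfold colsOf markedOf
  rw [markedB_eq M N g h, map_pyRange0]
  apply List.map_congr_left
  intro jN _
  have hkeep : ((PySem.List.pyRange 0 (M:Int) 1).filter
      (fun i => gget (markScan (buildUsed g M N) g M N) i (jN:Int) != 'x')).map
        (fun i => gget (markScan (buildUsed g M N) g M N) i (jN:Int))
      = (colOf (markScan (buildUsed g M N) g M N) jN).filter (fun ch => ch != 'x') := by
    rw [filter_pyRange0, List.map_map, Int.toNat_natCast]
    rw [colOf_eq_map (M := M) hsh.1 jN, List.filter_map]
    simp only [Function.comp_def, gget_cast]
  show PySem.List.pyRepeat ['x'] ((M:Int) - _) ++ _ = _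
  rw [hkeep, PySem.List.pyRepeat_singleton]
  unfold compactC
  have hle : ((colOf (markScan (buildUsed g M N) g M N) jN).filter
      (fun ch => ch != 'x')).length ≤ M := by
    have h1 := List.length_filter_le (fun ch => ch != 'x')
      (colOf (markScan (buildUsed g M N) g M N) jN)
    rw [length_colOf, hsh.1] at h1
    exact h1
  congr 2
  omega

theorem gridOf_eq (M N : Nat) (g : List (List Char)) (h : ShapeN M N g) :
    gridOf (M:Int) (N:Int) g = (List.range M).map (fun i => (List.range N).map (fun j =>
      (compactC M (colOf (markScan (buildUsed g M N) g M N) j)).getD i 'x')) := by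
  unfold gridOf
  rw [colsOf_eq M N g h, map_pyRange0]
  apply List.map_congr_left
  intro iN _
  rw [map_pyRange0]
  apply List.map_congr_left
  intro jN hjN
  rw [gget_cast]
  unfold get2
  rw [getD_map_range' N jN _ [] (List.mem_range.mp hjN)]

theorem grav_eq_gridOf (M N : Nat) (g : List (List Char)) (h : ShapeN M N g) :
    (List.range N).foldl (fun bb j => setCol bb j (gpass M (colOf bb j)))
      (markScan (buildUsed g M N) g M N) = gridOf (M:Int) (N:Int) g := by
  obtain ⟨hmk, _⟩ := markScan_props (buildUsed g M N) M N g h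
  rw [gridOf_eq M N g h]
  obtain ⟨hsh, hproc, _⟩ := gravFold (List.range N) _ hmk (by simp) (List.nodup_range)
  apply grid_ext hsh (shape_mapmap M N _)
  intro i j hi hj
  rw [get2_mapmap _ _ _ _ _ _ hi hj, ← colOf_getD, hproc j (by simp [hj]),
      gpass_eq_compactC M _ (by rw [length_colOf, hmk.1])]

theorem gravA_eq (M N : Nat) (b : List (List Char)) (hb : ShapeN M N b) :
    (PySem.List.pyRange 0 (N:Int) 1).foldl (fun b j =>
      (PySem.List.pyRange ((M:Int) - 1) (-1) (-1)).foldl (fun b i =>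
        if gget b i j == 'x' then
          let k : Int := (findTopA b j i.toNat : Int)
          if k - 1 ≥ 0 then gset (gset b i j (gget b (k - 1) j)) (k - 1) j 'x' else b
        else b) b) b
    = (List.range N).foldl (fun bb j => setCol bb j (gpass M (colOf bb j))) b := by
  rw [foldl_pyRange0]
  have hbody : (fun (bb : List (List Char)) (jN : Nat) =>
      (PySem.List.pyRange ((M:Int) - 1) (-1) (-1)).foldl (fun b i =>
        if gget b i (jN:Int) == 'x' then
          let k : Int := (findTopA b (jN:Int) i.toNat : Int)
          if k - 1 ≥ 0 then gset (gset b i (jN:Int) (gget b (k - 1) (jN:Int))) (k - 1) (jN:Int) 'x' else b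
        else b) bb)
      = (fun (bb : List (List Char)) (jN : Nat) =>
        ((List.range M).reverse).foldl (fun bb i => bodyAN bb jN i) bb) := by
    funext bb jN
    rw [foldl_pyRange_countdown]
    congr 1
    funext bb2 iN
    show _ = bodyAN bb2 jN iN
    rw [gget_cast]
    unfold bodyAN
    by_cases hx : (get2 'x' bb2 iN jN == 'x') = true
    · rw [if_pos hx, if_pos hx]
      show (if ((findTopA bb2 (jN:Int) ((iN:Int)).toNat : Int)) - 1 ≥ 0 then _ else _) = _
      rw [Int.toNat_natCast, findTopA_eq]
      by_cases hk : 1 ≤ ftop (colOf bb2 jN) iN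
      · rw [if_pos (by omega), if_pos hk]
        have ek : ((ftop (colOf bb2 jN) iN : Int) - 1)
            = ((ftop (colOf bb2 jN) iN - 1 : Nat) : Int) := by omega
        rw [ek, gget_cast, gset_cast, gset_cast]
      · rw [if_neg (by omega), if_neg hk]
    · rw [if_neg hx, if_neg hx]
  rw [hbody]
  exact gravA_to_model (List.range N) b hb (by simp)

theorem roundAB (M N : Nat) (g : List (List Char)) (h : ShapeN M N g) :
    (ischeckA (M : Int) (N : Int) g).1 = removedOf (M : Int) (N : Int) g ∧
    ((ischeckA (M : Int) (N : Int) g).1 ≠ 0 →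
      (ischeckA (M : Int) (N : Int) g).2 = gridOf (M : Int) (N : Int) g) := by
  obtain ⟨hmk, _⟩ := markScan_props (buildUsed g M N) M N g h
  simp only [ischeckA]
  rw [usedA_eq M N g, stfold_split, markA_eq, cntA_eq_removed]
  by_cases h0 : removedOf (M:Int) (N:Int) g = 0
  · constructor
    · simp [h0]
    · intro hne
      exfalso
      apply hne
      simp [h0]
  · have hcond : ¬ ((markScan (buildUsed g M N) g M N,
        removedOf (M:Int) (N:Int) g).2 == 0) = true := by simpa using h0
    constructor
    · rw [if_neg hcond]
    · intro _
      rw [if_neg hcond]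
      exact (gravA_eq M N _ hmk).trans (grav_eq_gridOf M N g h)

theorem loop_eq (M N : Nat) : ∀ (fuel : Nat) (g : List (List Char)) (ans : Int),
    ShapeN M N g → loopA (M : Int) (N : Int) fuel g ans = loopB (M : Int) (N : Int) fuel g ans := by
  intro fuel
  induction fuel with
  | zero => intro g ans _; rfl
  | succ fuel ih =>
    intro g ans h
    obtain ⟨hc, hg⟩ := roundAB M N g h
    rw [loopB_succ]
    show (if (ischeckA (M:Int) (N:Int) g).1 == 0 then ans
          else loopA (M:Int) (N:Int) fuel (ischeckA (M:Int) (N:Int) g).2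
            (ans + (ischeckA (M:Int) (N:Int) g).1)) = _
    rw [hc]
    by_cases h0 : removedOf (M : Int) (N : Int) g = 0
    · simp [h0]
    · have : (ischeckA (M:Int) (N:Int) g).1 ≠ 0 := by rw [hc]; exact h0
      rw [hg this]
      simp only [h0, beq_iff_eq, if_neg h0]
      exact ih _ _ (shape_gridOf M N g)

theorem uget_zeros (m n : Int) (i j : Int) :
    uget ((PySem.List.pyRange 0 m 1).map (fun _ => PySem.List.pyRepeat [0] n)) i j = 0 := by
  unfold uget
  by_cases hr : PySem.Raise.InRange ((PySem.List.pyRange 0 m 1).map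
      (fun _ => PySem.List.pyRepeat ([0] : List Int) n)).length i
  · have hmem := PySem.List.pyGetD_mem (xs := (PySem.List.pyRange 0 m 1).map (fun _ => PySem.List.pyRepeat ([0] : List Int) n)) ([] : List Int) hr
    obtain ⟨k, _, hk⟩ := List.mem_map.mp hmem
    rw [← hk, PySem.List.pyRepeat_singleton]
    by_cases hr2 : PySem.Raise.InRange (List.replicate n.toNat (0:Int)).length j
    · have hmem2 := PySem.List.pyGetD_mem _ (0:Int) hr2
      exact List.eq_of_mem_replicate hmem2
    · rw [PySem.List.pyGetD_of_none (List.replicate n.toNat (0:Int)) j 0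
          ((PySem.List.pyGet?_eq_none_iff _ _).mpr hr2)]
  · have he := PySem.List.pyGetD_of_none
      ((PySem.List.pyRange 0 m 1).map (fun _ => PySem.List.pyRepeat ([0] : List Int) n)) i
      ([] : List Int) ((PySem.List.pyGet?_eq_none_iff _ _).mpr hr)
    rw [he]
    exact PySem.List.pyGetD_of_none ([] : List Int) j 0
      ((PySem.List.pyGet?_eq_none_iff _ _).mpr (by
        intro hin
        have : (-(0:Int) ≤ j ∧ j < 0) := by
          simpa [PySem.Raise.InRange] using hin
        omega))

theorem coveredB_trivial (m n : Int) (g : List (List Char)) (i j : Int)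
    (h : m ≤ 1 ∨ n ≤ 1) : coveredB m n g i j = false := by
  unfold coveredB
  rw [List.any_eq_false]
  intro bi _
  intro hT
  obtain ⟨bj, -, hT2⟩ := List.any_eq_true.mp hT
  simp only [Bool.and_eq_true, decide_eq_true_eq] at hT2
  obtain ⟨⟨⟨⟨h1, h2⟩, h3⟩, h4⟩, -⟩ := hT2
  rcases h with h | h <;> omega

theorem ischeckA_trivial (m n : Int) (g : List (List Char)) (h : m ≤ 1 ∨ n ≤ 1) :
    ischeckA m n g = (0, g) := by
  simp only [ischeckA]
  have hused : (PySem.List.pyRange 0 (m-1) 1).foldl (fun used (i : Int) =>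
      (PySem.List.pyRange 0 (n-1) 1).foldl (fun used (j : Int) =>
        if gget g i j ≠ 'x' then
          let checkCnt : Int := [((0:Int),(1:Int)),(1,0),(1,1)].foldl (fun c ch =>
            if gget g i j == gget g (i + ch.1) (j + ch.2) then c + 1 else c) 0
          if checkCnt == 3 then
            [((0:Int),(1:Int)),(1,0),(1,1)].foldl (fun used ch =>
              uset used (i + ch.1) (j + ch.2) 1) (uset used i j 1)
          else used
        else used) used)
      ((PySem.List.pyRange 0 m 1).map (fun _ => PySem.List.pyRepeat [0] n))
      = (PySem.List.pyRange 0 m 1).map (fun _ => PySem.List.pyRepeat [0] n) := by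
    rcases h with h | h
    · rw [PySem.List.pyRange_one_eq_nil (a := 0) (b := m - 1) (by omega)]
      rfl
    · rw [PySem.List.pyRange_one_eq_nil (a := 0) (b := n - 1) (by omega)]
      simp [PySem.List.foldl_ignore]
  rw [hused]
  have hst : (PySem.List.pyRange 0 m 1).foldl (fun st (i : Int) =>
      (PySem.List.pyRange 0 n 1).foldl (fun st (j : Int) =>
        if uget ((PySem.List.pyRange 0 m 1).map (fun _ => PySem.List.pyRepeat [0] n)) i j == 1
        then (gset st.1 i j 'x', st.2 + 1) else st) st) (g, (0:Int)) = (g, 0) := by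
    have houter : (fun (st : List (List Char) × Int) (i : Int) =>
        (PySem.List.pyRange 0 n 1).foldl (fun st (j : Int) =>
          if uget ((PySem.List.pyRange 0 m 1).map (fun _ => PySem.List.pyRepeat [0] n)) i j == 1
          then (gset st.1 i j 'x', st.2 + 1) else st) st)
        = (fun st _ => st) := by
      funext st i
      have hin : (fun (st : List (List Char) × Int) (j : Int) =>
          if uget ((PySem.List.pyRange 0 m 1).map (fun _ => PySem.List.pyRepeat [0] n)) i j == 1
          then (gset st.1 i j 'x', st.2 + 1) else st) = (fun st _ => st) := by
        funext st j
        rw [uget_zeros m n i j]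
        rfl
      rw [hin, PySem.List.foldl_ignore]
    rw [houter, PySem.List.foldl_ignore]
  rw [hst]
  rfl

theorem loopB_trivial (m n : Int) (g : List (List Char)) (total : Int) (fuel : Nat)
    (h : m ≤ 1 ∨ n ≤ 1) : loopB m n (fuel + 1) g total = total := by
  rw [loopB_succ]
  have hrem : removedOf m n g = 0 := by
    unfold removedOf
    have houter : (fun (acc : Int) (i : Int) => (PySem.List.pyRange 0 n 1).foldl
        (fun acc (j : Int) => if coveredB m n g i j then acc + 1 else acc) acc)
        = (fun acc _ => acc) := by
      funext acc i
      have hin : (fun (acc : Int) (j : Int) =>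
          if coveredB m n g i j then acc + 1 else acc) = (fun acc _ => acc) := by
        funext acc j
        rw [coveredB_trivial m n g i j h]
        rfl
      rw [hin, PySem.List.foldl_ignore]
    rw [houter, PySem.List.foldl_ignore]
  rw [hrem]
  rfl

theorem solution_trivial (m n : Int) (board : List String) (h : m ≤ 1 ∨ n ≤ 1) :
    solution m n board = solution_alt m n board := by
  unfold solution solution_alt
  show loopA m n (m.toNat * n.toNat + 1) _ 0 = loopB m n (m.toNat * n.toNat + 1) _ 0
  rw [loopA, ischeckA_trivial m n _ h]
  rw [loopB_trivial m n _ 0 _ h]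
  rfl

theorem solution_empty (m n : Int) (h : m = 0) :
    solution m n [] = solution_alt m n [] := by
  subst h
  unfold solution solution_alt
  have e1 : PySem.List.pyRange 0 ((0:Int)-1) 1 = [] := PySem.List.pyRange_one_eq_nil (by omega)
  have e2 : PySem.List.pyRange 0 (0:Int) 1 = [] := PySem.List.pyRange_one_eq_nil (by omega)
  have efuel : (0:Int).toNat * n.toNat + 1 = 1 := by simp
  rw [efuel]
  simp [loopA, loopB, ischeckA, e1, e2]

-- ===== VERDICT (by name: the statement is the Claim_ definition above) =====
theorem solution_spec : Claim_equal_solution := by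
  intro m n board _ hpre
  unfold Spec_solution
  rcases hpre with htriv | ⟨hm, hrows⟩
  · exact solution_trivial m n board htriv
  cases board with
  | nil => exact solution_empty m n (by simpa using hm.symm)
  | cons r rest =>
    have hN : n = ((r.toList.length : Nat) : Int) := (hrows r (by simp)).symm
    have hmM : m = (((r :: rest).length : Nat) : Int) := hm.symm
    have hshape : ShapeN (r :: rest).length r.toList.length
        ((r :: rest).map (fun s => s.toList)) := by
      refine ⟨by simp, ?_⟩
      intro row hrow
      obtain ⟨s, hs, rfl⟩ := List.mem_map.mp hrow
      have hrl := hrows s hs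
      rw [hN] at hrl
      exact_mod_cast hrl
    unfold solution solution_alt
    rw [hmM, hN, Int.toNat_natCast, Int.toNat_natCast]
    exact loop_eq (r :: rest).length r.toList.length _ _ _ hshape
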